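-- pv_equiv track=rewrite | github.com/salsina/Design-and-Analysis-of-Algorithms-CA1-divide-and-conquer | ca1.1.py | calculate_happiness
-- ===== SOURCE A (Python) =====
-- def make_dict(dictionary):
--     new = {}
--     for i in dictionary:
--         new[i] = dictionary[i]
--     return new
--
-- def calculate_happiness(people_ages):
--
--     forward = [1] * len(people_ages)
--     behind = [0] * len(people_ages)
--     dictionary = {}
--
--     for i in range(len(people_ages)):
--         if not people_ages[i] in dictionary:
--             dictionary[people_ages[i]] = 1
--         else:
--             dictionary[people_ages[i]] += 1
--
--     copy_dict = make_dict(dictionary)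
--
--     for i in range(len(people_ages)):
--         behind[i] = dictionary[people_ages[i]]
--         forward[i] = copy_dict[people_ages[i]] - dictionary[people_ages[i]] +1
--         dictionary[people_ages[i]] -= 1
--
--     return forward,behind
-- ===== SOURCE B (Python) =====
-- def calculate_happiness(people_ages):
--     counts = {}
--     forward = []
--     for age in people_ages:
--         counts[age] = counts.get(age, 0) + 1
--         forward.append(counts[age])
--     counts2 = {}
--     behind = []
--     for age in reversed(people_ages):
--         counts2[age] = counts2.get(age, 0) + 1
--         behind.append(counts2[age])
--     behind.reverse()
--     return forward, behind
-- ===== Notes on version B (the rewrite author's own statement) =====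
-- stated objective: simpler
-- what changed: Replaces the full frequency table, its hand-rolled copy and the decrement trick with two independent running-count passes: a left-to-right pass producing forward and a right-to-left pass producing behind.
import Mathlib
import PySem

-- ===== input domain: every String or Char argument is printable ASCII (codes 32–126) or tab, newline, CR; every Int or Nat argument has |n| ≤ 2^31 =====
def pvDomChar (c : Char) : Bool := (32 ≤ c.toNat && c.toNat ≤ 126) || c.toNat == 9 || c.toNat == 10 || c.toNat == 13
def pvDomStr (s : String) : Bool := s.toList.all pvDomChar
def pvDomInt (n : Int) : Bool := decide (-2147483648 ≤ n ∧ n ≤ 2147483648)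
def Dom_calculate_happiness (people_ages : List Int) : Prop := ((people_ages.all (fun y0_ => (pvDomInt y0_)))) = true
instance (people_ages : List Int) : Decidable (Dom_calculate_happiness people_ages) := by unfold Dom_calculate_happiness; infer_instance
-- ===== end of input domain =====

-- B replaces A's full frequency table + hand-rolled copy + decrement trick by two independent
-- running-count passes (left-to-right for forward, right-to-left for behind): simpler.

-- ===== PORT A =====
-- make_dict: iterates the dict's keys; dictionary[i] never raises since i is a key (getD exact here)
def make_dict (dictionary : PySem.Dict Int Int) : PySem.Dict Int Int :=
  dictionary.keys.foldl (fun new i => new.insert i (dictionary.getD i 0)) PySem.Dict.empty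

-- the body of A's second loop (behind/forward writes, then the decrement), as in the Python
def pvBodyA (l : List Int) (copy_dict : PySem.Dict Int Int)
    (st : List Int × List Int × PySem.Dict Int Int) (i : Int) :
    List Int × List Int × PySem.Dict Int Int :=
  let x := PySem.List.pyGetD l i 0
  let behind' := PySem.List.pySetD st.2.1 i (st.2.2.getD x 0)
  let forward' := PySem.List.pySetD st.1 i (copy_dict.getD x 0 - st.2.2.getD x 0 + 1)
  (forward', behind', st.2.2.insert x (st.2.2.getD x 0 - 1))

def calculate_happiness (people_ages : List Int) : List Int × List Int :=
  let forward := List.replicate people_ages.length (1 : Int)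
  let behind := List.replicate people_ages.length (0 : Int)
  -- first loop: build the frequency table (dictionary[x] += 1 is exact: x is in the dict there)
  let dictionary := (PySem.List.pyRange 0 (PySem.List.len people_ages) 1).foldl
    (fun d i =>
      let x := PySem.List.pyGetD people_ages i 0
      if ¬ d.contains x then d.insert x 1 else d.insert x (d.getD x 0 + 1))
    (PySem.Dict.empty : PySem.Dict Int Int)
  let copy_dict := make_dict dictionary
  let res := (PySem.List.pyRange 0 (PySem.List.len people_ages) 1).foldl
    (pvBodyA people_ages copy_dict) (forward, behind, dictionary)
  (res.1, res.2.1)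

-- ===== PORT B =====
-- one step of a running-count pass: bump counts[age], append the new count
def pvStepB (st : PySem.Dict Int Int × List Int) (age : Int) :
    PySem.Dict Int Int × List Int :=
  let counts := st.1.insert age (st.1.getD age 0 + 1)
  (counts, st.2 ++ [counts.getD age 0])

def calculate_happiness_alt (people_ages : List Int) : List Int × List Int :=
  let fwd := people_ages.foldl pvStepB (PySem.Dict.empty, [])
  let bwd := people_ages.reverse.foldl pvStepB (PySem.Dict.empty, [])
  (fwd.2, bwd.2.reverse)

-- ===== PRECONDITION & SPEC =====
def Spec_calculate_happiness (people_ages : List Int) (out : List Int × List Int) : Prop := out = calculate_happiness_alt people_ages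
instance (people_ages : List Int) (out : List Int × List Int) : Decidable (Spec_calculate_happiness people_ages out) := by unfold Spec_calculate_happiness; infer_instance

-- ===== CLAIM (what is proved, stated in full; the proofs are below) =====
def Claim_equal_calculate_happiness : Prop := ∀ (people_ages : List Int), Dom_calculate_happiness people_ages → Spec_calculate_happiness people_ages (calculate_happiness people_ages)

-- ===== LEMMAS AND PROOFS =====

-- forward counts of l, given already-seen prefix pre
def fwdC : List Int → List Int → List Int
  | _, [] => []
  | pre, x :: xs => ((pre.count x : Int) + 1) :: fwdC (pre ++ [x]) xs

-- behind counts: each element with the count of its occurrences from itself to the end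
def bwdC : List Int → List Int
  | [] => []
  | x :: xs => ((xs.count x : Int) + 1) :: bwdC xs

theorem fwdC_append (a b pre : List Int) :
    fwdC pre (a ++ b) = fwdC pre a ++ fwdC (pre ++ a) b := by
  induction a generalizing pre with
  | nil => simp [fwdC]
  | cons x xs ih => simp [fwdC, ih, List.append_assoc]

theorem fwdC_reverse (l : List Int) : (fwdC [] l.reverse).reverse = bwdC l := by
  induction l with
  | nil => simp [fwdC, bwdC]
  | cons x xs ih =>
    have h := fwdC_append xs.reverse [x] ([] : List Int)
    simp [fwdC] at h
    simp [bwdC, h, ih]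

theorem stepB_snd (l : List Int) : ∀ (pre acc : List Int) (d : PySem.Dict Int Int),
    (∀ v, d.getD v 0 = (pre.count v : Int)) →
    (l.foldl pvStepB (d, acc)).2 = acc ++ fwdC pre l := by
  induction l with
  | nil => intro pre acc d _; simp [fwdC]
  | cons x xs ih =>
    intro pre acc d hd
    have hx : (d.insert x (d.getD x 0 + 1)).getD x 0 = (pre.count x : Int) + 1 := by
      simp [PySem.Dict.getD_insert_self, hd]
    have hinv : ∀ v, (d.insert x (d.getD x 0 + 1)).getD v 0 = (((pre ++ [x]).count v : Nat) : Int) := by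
      intro v
      rw [PySem.Dict.getD_insert]
      rcases eq_or_ne v x with h | h
      · subst h; simp [hd, List.count_append]
      · simp [h, hd, List.count_append, Ne.symm h]
    have := ih (pre ++ [x]) (acc ++ [(pre.count x : Int) + 1]) (d.insert x (d.getD x 0 + 1)) hinv
    simp only [List.foldl_cons, pvStepB, hx] at this ⊢
    simp [this, fwdC]

theorem alt_eq (l : List Int) : calculate_happiness_alt l = (fwdC [] l, bwdC l) := by
  unfold calculate_happiness_alt
  have h1 := stepB_snd l [] [] PySem.Dict.empty (by simp [PySem.Dict.getD_empty])
  have h2 := stepB_snd l.reverse [] [] PySem.Dict.empty (by simp [PySem.Dict.getD_empty])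
  simp only [h1, h2, List.nil_append]
  simp [fwdC_reverse]

-- A's first loop merged: the not-in branch inserts 1 = getD+1 since getD is 0 there
theorem loop1_eq (l : List Int) : ∀ (d : PySem.Dict Int Int),
    l.foldl (fun d x => if ¬ d.contains x then d.insert x 1 else d.insert x (d.getD x 0 + 1)) d
      = l.foldl (fun d x => d.insert x (d.getD x 0 + 1)) d := by
  induction l with
  | nil => intro d; rfl
  | cons x xs ih =>
    intro d
    simp only [List.foldl_cons]
    by_cases h : d.contains x
    · rw [if_neg (by simp [h]), ih]
    · rw [if_pos (by simp [h]), ih]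
      congr 2
      rw [PySem.Dict.getD_of_not_contains d 0 (by simpa using h)]
      norm_num

theorem make_dict_getD (d : PySem.Dict Int Int) :
    ∀ (ks : List Int) (nd : PySem.Dict Int Int) (v : Int),
    (ks.foldl (fun nd k => nd.insert k (d.getD k 0)) nd).getD v 0
      = if v ∈ ks then d.getD v 0 else nd.getD v 0 := by
  intro ks
  induction ks with
  | nil => intro nd v; simp
  | cons k ks ih =>
    intro nd v
    by_cases hv : v ∈ ks
    · simp [ih, hv]
    · rcases eq_or_ne v k with he | he
      · subst he; simp [ih, hv, PySem.Dict.getD_insert_self]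
      · simp [ih, hv, he, PySem.Dict.getD_insert_of_ne _ _ _ he]

theorem copy_getD (l : List Int) (v : Int) :
    (make_dict (PySem.Dict.counter l)).getD v 0 = (l.count v : Int) := by
  unfold make_dict
  rw [make_dict_getD]
  by_cases hv : v ∈ l
  · simp [PySem.Dict.keys_counter, PySem.Set.mem_ofList, hv, PySem.Dict.getD_counter]
  · simp [PySem.Dict.keys_counter, PySem.Set.mem_ofList, hv, PySem.Dict.getD_empty,
      List.count_eq_zero.mpr hv]

theorem take_succ_set (f : List Int) : ∀ (k : Nat) (w : Int), k < f.length →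
    (f.set k w).take (k + 1) = f.take k ++ [w] := by
  induction f with
  | nil => intro k w h; simp at h
  | cons a as ih =>
    intro k w h
    cases k with
    | zero => simp
    | succ k => simp [List.set_cons_succ, List.take_succ_cons, ih k w (by simpa using h)]

theorem getD_append_cons (pre xs : List Int) (x : Int) :
    (pre ++ x :: xs).getD pre.length 0 = x := by
  simp [List.getD_eq_getElem?_getD]

theorem pyRange_congr (a a' b b' : Int) (ha : a = a') (hb : b = b') :
    PySem.List.pyRange a b = PySem.List.pyRange a' b' := by rw [ha, hb]

theorem loopA (copy : PySem.Dict Int Int) :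
    ∀ (suf pre f b : List Int) (d : PySem.Dict Int Int),
    f.length = pre.length + suf.length →
    b.length = pre.length + suf.length →
    (∀ v, d.getD v 0 = (suf.count v : Int)) →
    (∀ v, copy.getD v 0 = ((pre ++ suf).count v : Int)) →
    ((PySem.List.pyRange (pre.length) ((pre.length : Int) + suf.length)).foldl
        (pvBodyA (pre ++ suf) copy) (f, b, d)).1 = f.take pre.length ++ fwdC pre suf
    ∧ ((PySem.List.pyRange (pre.length) ((pre.length : Int) + suf.length)).foldl
        (pvBodyA (pre ++ suf) copy) (f, b, d)).2.1 = b.take pre.length ++ bwdC suf := by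
  intro suf
  induction suf with
  | nil =>
    intro pre f b d hf hb _ _
    rw [PySem.List.pyRange_one_eq_nil (by simp)]
    simp only [List.foldl_nil]
    constructor
    · simp [fwdC, List.take_of_length_le (le_of_eq (by simpa using hf))]
    · simp [bwdC, List.take_of_length_le (le_of_eq (by simpa using hb))]
  | cons x xs ih =>
    intro pre f b d hf hb hd hc
    rw [PySem.List.pyRange_one_cons (by simp)]
    simp only [List.foldl_cons]
    have hx : PySem.List.pyGetD (pre ++ x :: xs) (pre.length : Int) 0 = x := by
      rw [PySem.List.pyGetD_natCast, getD_append_cons]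
    have hdx : d.getD x 0 = (xs.count x : Int) + 1 := by
      rw [hd]; push_cast [List.count_cons_self]; ring
    have hcx : copy.getD x 0 = (pre.count x : Int) + (xs.count x : Int) + 1 := by
      rw [hc]; push_cast [List.count_append, List.count_cons_self]; ring
    have hbody : pvBodyA (pre ++ x :: xs) copy (f, b, d) (pre.length : Int)
        = (f.set pre.length ((pre.count x : Int) + 1),
           b.set pre.length ((xs.count x : Int) + 1),
           d.insert x (d.getD x 0 - 1)) := by
      simp only [pvBodyA, hx, PySem.List.pySetD_natCast, hdx, hcx]
      have harith : ((pre.count x : Int) + (xs.count x : Int) + 1 - ((xs.count x : Int) + 1) + 1)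
          = (pre.count x : Int) + 1 := by ring
      rw [harith]
    rw [hbody]
    have hd2 : ∀ v, (d.insert x (d.getD x 0 - 1)).getD v 0 = (xs.count v : Int) := by
      intro v
      rw [PySem.Dict.getD_insert]
      rcases eq_or_ne v x with h | h
      · subst h; simp [hdx]
      · simp [h, hd, Ne.symm h]
    have hc2 : ∀ v, copy.getD v 0 = (((pre ++ [x]) ++ xs).count v : Int) := by
      intro v; rw [hc]; simp [List.count_append, List.count_cons]
    have hrec := ih (pre ++ [x]) (f.set pre.length ((pre.count x : Int) + 1))
      (b.set pre.length ((xs.count x : Int) + 1)) (d.insert x (d.getD x 0 - 1))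
      (by simp at hf ⊢; omega) (by simp at hb ⊢; omega) hd2 hc2
    rw [List.append_assoc] at hrec
    simp only [List.singleton_append] at hrec
    have hrange : (PySem.List.pyRange ((pre ++ [x]).length : Nat) (((pre ++ [x]).length : Int) + (xs.length : Int)))
        = (PySem.List.pyRange ((pre.length : Int) + 1) ((pre.length : Int) + ((x :: xs).length : Int))) :=
      pyRange_congr _ _ _ _ (by simp) (by simp; omega)
    rw [hrange] at hrec
    simp only [List.length_append, List.length_cons, List.length_nil, Nat.zero_add] at hrec ⊢
    obtain ⟨h1, h2⟩ := hrec
    constructor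
    · rw [h1, take_succ_set f pre.length _ (by simp at hf; omega), fwdC, List.append_assoc,
        List.singleton_append]
    · rw [h2, take_succ_set b pre.length _ (by simp at hb; omega), bwdC, List.append_assoc,
        List.singleton_append]

theorem a_eq (l : List Int) : calculate_happiness l = (fwdC [] l, bwdC l) := by
  unfold calculate_happiness
  have hfun : (fun (d : PySem.Dict Int Int) (i : Int) =>
        let x := PySem.List.pyGetD l i 0
        if ¬ d.contains x then d.insert x 1 else d.insert x (d.getD x 0 + 1))
      = (fun (d : PySem.Dict Int Int) (i : Int) =>
          (fun (dd : PySem.Dict Int Int) (x : Int) =>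
            if ¬ dd.contains x then dd.insert x 1 else dd.insert x (dd.getD x 0 + 1))
            d (PySem.List.pyGetD l i 0)) := rfl
  have hloop1 : (PySem.List.pyRange 0 (PySem.List.len l)).foldl
      (fun (d : PySem.Dict Int Int) (i : Int) =>
        let x := PySem.List.pyGetD l i 0
        if ¬ d.contains x then d.insert x 1 else d.insert x (d.getD x 0 + 1))
      PySem.Dict.empty = PySem.Dict.counter l := by
    rw [hfun]
    exact (PySem.List.foldl_pyRange_zero_pyGetD l 0
        (fun (dd : PySem.Dict Int Int) (x : Int) =>
          if ¬ dd.contains x then dd.insert x 1 else dd.insert x (dd.getD x 0 + 1))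
        PySem.Dict.empty).trans
      (by rw [loop1_eq, PySem.Dict.foldl_insert_getD_add_one_eq_counter])
  simp only [hloop1]
  have hd : ∀ v, (PySem.Dict.counter l).getD v 0 = (l.count v : Int) :=
    fun v => PySem.Dict.getD_counter l v
  have hc : ∀ v, (make_dict (PySem.Dict.counter l)).getD v 0 = ((([] : List Int) ++ l).count v : Int) := by
    intro v; simpa using copy_getD l v
  have h := loopA (make_dict (PySem.Dict.counter l)) l []
    (List.replicate l.length (1 : Int)) (List.replicate l.length (0 : Int))
    (PySem.Dict.counter l) (by simp) (by simp) hd hc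
  have hrange0 : PySem.List.pyRange 0 (PySem.List.len l)
      = PySem.List.pyRange ((([] : List Int).length : Nat) : Int) ((([] : List Int).length : Int) + (l.length : Int)) :=
    pyRange_congr _ _ _ _ (by simp) (by simp [PySem.List.len_eq])
  rw [hrange0]
  simp only [List.nil_append] at h
  obtain ⟨h1, h2⟩ := h
  rw [Prod.ext_iff]
  constructor
  · simpa using h1
  · simpa using h2

-- ===== VERDICT (by name: the statement is the Claim_ definition above) =====
theorem calculate_happiness_spec : Claim_equal_calculate_happiness := by
  intro l _
  unfold Spec_calculate_happiness
  rw [a_eq, alt_eq]
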